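-- pv_equiv track=rewrite | github.com/tmactong/AMMM-project | src/project/helpers/cycles_generator.py | generate_branches
-- ===== SOURCE A (Python) =====
-- import typing
--
-- def generate_branches(
--         branch: typing.List[int],
--         pairs: typing.List[typing.Tuple[int, int]]
-- ) -> typing.Iterable[typing.List[int]]:
--     continue_search = False
--     for pair in pairs:
--         if pair[0] == branch[-1]:
--             continue_search = True
--             yield from generate_branches(branch + [pair[1]], [x for x in pairs if pair[0] not in x])
--     if not continue_search:
--         yield branch
-- ===== SOURCE B (Python) =====
-- def generate_branches(branch, pairs):
--     # Index pairs by start node once; track consumed nodes in a visited set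
--     # instead of copying/filtering the pair list at every recursion step.
--     adj = {}
--     for a, b in pairs:
--         adj.setdefault(a, []).append(b)
--     out = []
--
--     def dfs(path, visited):
--         extended = False
--         if path and path[-1] not in visited:
--             u = path[-1]
--             for v in adj.get(u, ()):
--                 if v not in visited:
--                     extended = True
--                     dfs(path + [v], visited | {u})
--         if not extended:
--             out.append(path)
--
--     dfs(branch, frozenset())
--     return out
-- ===== Notes on version B (the rewrite author's own statement) =====
-- stated objective: alternative
-- what changed: Instead of rescanning and copying the whole pair list at every recursion step, B builds an adjacency dict (start node -> successors) once and threads a visited set, so each node expansion touches only the out-edges of the current node (measured ~1.2x at the largest timing size, below the 1.5x bar, so no speed claim).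
import Mathlib
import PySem

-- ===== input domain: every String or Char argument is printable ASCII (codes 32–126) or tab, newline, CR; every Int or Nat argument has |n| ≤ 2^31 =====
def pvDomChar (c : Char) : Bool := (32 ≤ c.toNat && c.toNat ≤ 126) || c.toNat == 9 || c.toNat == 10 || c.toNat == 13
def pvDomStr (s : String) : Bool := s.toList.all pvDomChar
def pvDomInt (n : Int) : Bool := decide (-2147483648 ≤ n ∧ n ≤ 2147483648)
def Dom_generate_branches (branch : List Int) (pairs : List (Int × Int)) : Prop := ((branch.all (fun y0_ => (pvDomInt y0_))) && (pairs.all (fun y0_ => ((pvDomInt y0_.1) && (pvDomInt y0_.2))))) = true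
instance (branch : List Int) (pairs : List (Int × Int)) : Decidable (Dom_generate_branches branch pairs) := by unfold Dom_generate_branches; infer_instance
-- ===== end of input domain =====

-- B replaces A's per-step rescan-and-copy of the pair list by a start-node adjacency dict
-- built once plus a visited set (objective: alternative algorithm, same measured cost).


-- ===== PORT A =====
-- literal port of A: scan all pairs for pair[0] == branch[-1]; on each hit recurse with
-- branch + [pair[1]] and the pair list re-filtered to drop every pair containing pair[0];
-- yield branch itself iff no pair matched.  'yield'ed lists are collected in order.
def generate_branches (branch : List Int) (pairs : List (Int × Int)) : List (List Int) :=
  let r := pairs.attach.foldl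
    (fun (acc : Bool × List (List Int)) pp =>
      if some pp.1.1 = PySem.List.pyGet? branch (-1) then
        (true, acc.2 ++ generate_branches (branch ++ [pp.1.2])
          (pairs.filter (fun x => !(pp.1.1 == x.1 || pp.1.1 == x.2))))
      else acc)
    (false, [])
  if r.1 then r.2 else r.2 ++ [branch]
termination_by pairs.length
decreasing_by
  simp only [List.length_unattach]
  rw [← List.length_attach (l := pairs)]
  refine List.length_filter_lt_length_iff_exists.mpr ⟨pp, List.mem_attach _ _, ?_⟩
  simp

-- ===== PORT B =====
-- B's adjacency loop: for a, b in pairs: adj.setdefault(a, []).append(b)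
def pvAdjOf (pairs : List (Int × Int)) : PySem.Dict Int (List Int) :=
  pairs.foldl (fun d p => d.modify p.1 [] (fun l => l ++ [p.2])) PySem.Dict.empty

-- B's dfs: expand path[-1] through adj unless it is visited; append path to out when
-- no extension happened.  Returns the list `out` of completed paths in append order.
def genB_dfs (adj : PySem.Dict Int (List Int)) (path : List Int) (visited : PySem.Set Int) :
    List (List Int) :=
  let r :=
    match PySem.List.pyGet? path (-1) with
    | none => (false, ([] : List (List Int)))         -- `if path …` is false: loop skipped
    | some u =>
      if hvu : visited.contains u then (false, [])    -- `path[-1] not in visited` is false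
      else
        (adj.getD u []).attach.foldl
          (fun (acc : Bool × List (List Int)) (vv : {x // x ∈ adj.getD u []}) =>
            if visited.contains vv.1 then acc
            else (true, acc.2 ++ genB_dfs adj (path ++ [vv.1]) (PySem.Set.add visited u)))
          (false, [])
  if r.1 then r.2 else r.2 ++ [path]
termination_by ((PySem.Dict.keys adj).filter (fun k => !(visited.contains k))).length
decreasing_by
  have hcon : adj.contains u = true := by
    by_contra hc
    have : adj.getD u [] = [] :=
      PySem.Dict.getD_of_not_contains adj [] (by simpa using hc)
    rw [this] at vv; exact absurd vv.2 (List.not_mem_nil)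
  have hk : u ∈ PySem.Dict.keys adj := (PySem.Dict.contains_iff_mem_keys adj u).mp hcon
  have himp : ∀ k, (!((PySem.Set.add visited u).contains k)) = true →
      (!(visited.contains k)) = true := by
    intro k h
    simp only [Bool.not_eq_eq_eq_not, Bool.not_true, ← Bool.not_eq_true] at h ⊢
    intro hm
    exact h ((PySem.Set.contains_iff _ _).mpr
      ((PySem.Set.mem_add visited u k).mpr (Or.inl ((PySem.Set.contains_iff _ _).mp hm))))
  have hsplit : (PySem.Dict.keys adj).filter (fun k => !((PySem.Set.add visited u).contains k))
      = ((PySem.Dict.keys adj).filter (fun k => !(visited.contains k))).filter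
          (fun k => !((PySem.Set.add visited u).contains k)) := by
    rw [List.filter_filter]
    refine List.filter_congr (fun x _ => ?_)
    by_cases h : (!((PySem.Set.add visited u).contains x)) = true
    · rw [h, himp x h]; rfl
    · have h' : (!((PySem.Set.add visited u).contains x)) = false := by simpa using h
      rw [h']
      simp
  rw [hsplit]
  refine List.length_filter_lt_length_iff_exists.mpr ⟨u, ?_, ?_⟩
  · exact List.mem_filter.mpr ⟨hk, by simpa using hvu⟩
  · simp [PySem.Set.mem_add]

def generate_branches_alt (branch : List Int) (pairs : List (Int × Int)) : List (List Int) :=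
  let adj := pvAdjOf pairs
  genB_dfs adj branch PySem.Set.empty

-- ===== PRECONDITION & SPEC =====
-- Pre_ excludes exactly the inputs where Python A raises IndexError at branch[-1]:
-- branch = [] with pairs ≠ [].
def Pre_generate_branches (branch : List Int) (pairs : List (Int × Int)) : Prop :=
  branch = [] → pairs = []
instance (branch : List Int) (pairs : List (Int × Int)) : Decidable (Pre_generate_branches branch pairs) := by unfold Pre_generate_branches; infer_instance
def pvWitness_generate_branches : List Int × (List (Int × Int)) := ([1], [(1, 2)])

def Spec_generate_branches (branch : List Int) (pairs : List (Int × Int)) (out : List (List Int)) : Prop := out = generate_branches_alt branch pairs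
instance (branch : List Int) (pairs : List (Int × Int)) (out : List (List Int)) : Decidable (Spec_generate_branches branch pairs out) := by unfold Spec_generate_branches; infer_instance

-- ===== CLAIM (what is proved, stated in full; the proofs are below) =====
def Claim_equal_generate_branches : Prop := ∀ (branch : List Int) (pairs : List (Int × Int)), Dom_generate_branches branch pairs → Pre_generate_branches branch pairs → Spec_generate_branches branch pairs (generate_branches branch pairs)

-- ===== LEMMAS AND PROOFS =====

-- a pair still survives A's accumulated filters iff neither endpoint was expanded yet
def pvSurv (visited : PySem.Set Int) (x : Int × Int) : Bool :=
  !(PySem.Set.contains visited x.1) && !(PySem.Set.contains visited x.2)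

-- the shape of A's for-loop accumulator
theorem pv_loopA_spec {α : Type} (C : α → Prop) [DecidablePred C] (g : α → List (List Int))
    (l : List α) (b : Bool) (out : List (List Int)) :
    l.foldl (fun acc p => if C p then (true, acc.2 ++ g p) else acc) (b, out)
    = (b || l.any (fun p => decide (C p)), out ++ (l.filter (fun p => decide (C p))).flatMap g) := by
  induction l generalizing b out with
  | nil => simp
  | cons p l ih =>
    by_cases h : C p
    · simp [h, ih]
    · simp [h, ih]

-- the shape of B's for-loop accumulator (skip-on-visited variant)
theorem pv_loopB_spec {α : Type} (c : α → Bool) (g : α → List (List Int)) (l : List α)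
    (b : Bool) (out : List (List Int)) :
    l.foldl (fun acc v => if c v then acc else (true, acc.2 ++ g v)) (b, out)
    = (b || l.any (fun v => !(c v)), out ++ (l.filter (fun v => !(c v))).flatMap g) := by
  induction l generalizing b out with
  | nil => simp
  | cons v l ih =>
    by_cases h : c v = true
    · simp [h, ih]
    · simp only [Bool.not_eq_true] at h; simp [h, ih]

theorem pv_A_step (path : List Int) (P : List (Int × Int)) :
    generate_branches path P =
      (P.filter (fun x => decide (some x.1 = PySem.List.pyGet? path (-1)))).flatMap
        (fun p => generate_branches (path ++ [p.2])
          (P.filter (fun x => !(p.1 == x.1 || p.1 == x.2))))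
      ++ (if P.any (fun x => decide (some x.1 = PySem.List.pyGet? path (-1))) then []
          else [path]) := by
  rw [generate_branches]
  rw [List.foldl_attach (f := fun acc p =>
    if some (p : Int × Int).1 = PySem.List.pyGet? path (-1) then
      (true, acc.2 ++ generate_branches (path ++ [p.2])
        (P.filter (fun x => !(p.1 == x.1 || p.1 == x.2))))
    else acc)]
  rw [pv_loopA_spec (fun x => some x.1 = PySem.List.pyGet? path (-1))
    (fun p => generate_branches (path ++ [p.2])
      (P.filter (fun x => !(p.1 == x.1 || p.1 == x.2)))) P false []]
  cases h : P.any (fun x => decide (some x.1 = PySem.List.pyGet? path (-1))) <;> simp [h]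

theorem pv_B_step (adj : PySem.Dict Int (List Int)) (path : List Int)
    (visited : PySem.Set Int) :
    genB_dfs adj path visited =
      match PySem.List.pyGet? path (-1) with
      | none => [path]
      | some u =>
        if visited.contains u then [path]
        else
          ((adj.getD u []).filter (fun v => !(visited.contains v))).flatMap
            (fun v => genB_dfs adj (path ++ [v]) (PySem.Set.add visited u))
          ++ (if (adj.getD u []).any (fun v => !(visited.contains v)) then [] else [path]) := by
  rw [genB_dfs]
  cases hu : PySem.List.pyGet? path (-1) with
  | none => simp
  | some u =>
    by_cases hv : visited.contains u = true
    · have hm : u ∈ visited := (PySem.Set.contains_iff _ _).mp hv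
      simp [hm]
    · simp only [hu]
      rw [dif_neg hv]
      rw [List.foldl_attach (f := fun acc v =>
        if visited.contains v then acc
        else (true, acc.2 ++ genB_dfs adj (path ++ [v]) (PySem.Set.add visited u)))]
      rw [pv_loopB_spec (fun v => visited.contains v)
        (fun v => genB_dfs adj (path ++ [v]) (PySem.Set.add visited u)) (adj.getD u []) false []]
      rw [if_neg hv]
      cases h : (adj.getD u []).any (fun v => !(visited.contains v)) <;> simp [h]

theorem pv_adj_getD (pairs : List (Int × Int)) (u : Int) :
    (pvAdjOf pairs).getD u [] = (pairs.filter (fun p => p.1 == u)).map (fun p => p.2) := by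
  unfold pvAdjOf
  rw [PySem.Dict.getD_foldl_modify_append]
  simp

theorem pv_contains_add (s : PySem.Set Int) (x y : Int) :
    (PySem.Set.add s x).contains y = (s.contains y || y == x) := by
  rw [PySem.Set.add_eq_ite]
  split
  next h =>
    by_cases hyx : y = x
    · have h1 : s.contains y = true := (PySem.Set.contains_iff s y).mpr (hyx ▸ h)
      rw [h1]; simp
    · have hyb : (y == x) = false := by simpa using hyx
      rw [hyb, Bool.or_false]
  next h =>
    by_cases hyx : y = x
    · have h1 : (s ++ [x]).contains y = true :=
        (PySem.Set.contains_iff _ y).mpr (List.mem_append.mpr (Or.inr (by simp [hyx])))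
      have h2 : (y == x) = true := by simp [hyx]
      rw [h1, h2]; simp
    · have hyb : (y == x) = false := by simpa using hyx
      rw [hyb, Bool.or_false]
      cases hc : s.contains y with
      | true =>
        exact (PySem.Set.contains_iff _ y).mpr
          (List.mem_append.mpr (Or.inl ((PySem.Set.contains_iff s y).mp hc)))
      | false =>
        refine Bool.eq_false_iff.mpr (fun hcc => ?_)
        rcases List.mem_append.mp ((PySem.Set.contains_iff _ y).mp hcc) with hm | hm
        · rw [(PySem.Set.contains_iff s y).mpr hm] at hc; cases hc
        · exact hyx (by simpa using hm)

theorem pv_B_step_none (adj : PySem.Dict Int (List Int)) (path : List Int)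
    (visited : PySem.Set Int) (h : PySem.List.pyGet? path (-1) = none) :
    genB_dfs adj path visited = [path] := by
  rw [pv_B_step, h]

theorem pv_B_step_some (adj : PySem.Dict Int (List Int)) (path : List Int)
    (visited : PySem.Set Int) (u : Int) (h : PySem.List.pyGet? path (-1) = some u) :
    genB_dfs adj path visited =
      if visited.contains u then [path]
      else
        ((adj.getD u []).filter (fun v => !(visited.contains v))).flatMap
          (fun v => genB_dfs adj (path ++ [v]) (PySem.Set.add visited u))
        ++ (if (adj.getD u []).any (fun v => !(visited.contains v)) then [] else [path]) := by
  rw [pv_B_step, h]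

theorem pv_main (n : Nat) (pairs : List (Int × Int)) (visited : PySem.Set Int)
    (path : List Int) (hn : (pairs.filter (pvSurv visited)).length ≤ n) :
    generate_branches path (pairs.filter (pvSurv visited))
      = genB_dfs (pvAdjOf pairs) path visited := by
  induction n using Nat.strong_induction_on generalizing visited path with
  | _ n IH =>
  rw [pv_A_step]
  cases hu : PySem.List.pyGet? path (-1) with
  | none =>
    have h1 : (pairs.filter (pvSurv visited)).filter
        (fun x => decide ((some x.1 : Option Int) = none)) = [] :=
      List.filter_eq_nil_iff.mpr (by intro a _; simp)
    have h2 : (pairs.filter (pvSurv visited)).any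
        (fun x => decide ((some x.1 : Option Int) = none)) = false :=
      List.any_eq_false.mpr (by intro a _; simp)
    rw [h1, h2, pv_B_step_none _ _ _ hu]
    simp
  | some u =>
    by_cases hv : visited.contains u = true
    · -- u already expanded: every surviving pair avoids u, so A finds no match either
      have hm : u ∈ visited := (PySem.Set.contains_iff _ _).mp hv
      have hno : ∀ x ∈ pairs.filter (pvSurv visited),
          ¬ (decide (some x.1 = some u)) = true := by
        intro x hx hc
        have hx1u : x.1 = u := by simpa using hc
        have hs := (List.mem_filter.mp hx).2
        rw [pvSurv, hx1u] at hs
        rw [(PySem.Set.contains_iff visited u).mpr hm] at hs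
        simp at hs
      have h1 : (pairs.filter (pvSurv visited)).filter
          (fun x => decide (some x.1 = some u)) = [] := List.filter_eq_nil_iff.mpr hno
      have h2 : (pairs.filter (pvSurv visited)).any
          (fun x => decide (some x.1 = some u)) = false := List.any_eq_false.mpr hno
      rw [h1, h2, pv_B_step_some _ _ _ _ hu, if_pos hv]
      simp
    · -- u unexpanded: align A's matches with B's adjacency successors
      rw [pv_B_step_some _ _ _ _ hu, if_neg hv]
      have hvff : visited.contains u = false := by simpa using hv
      -- F1: the two candidate lists
      have hF1 : ((pairs.filter (pvSurv visited)).filter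
            (fun x => decide (some x.1 = some u))).map (fun p => p.2)
          = ((pvAdjOf pairs).getD u []).filter (fun v => !(visited.contains v)) := by
        rw [pv_adj_getD, List.filter_map, List.filter_filter, List.filter_filter]
        refine congrArg _ (List.filter_congr (fun x _ => ?_))
        by_cases hxu : x.1 = u
        · have hmem : u ∉ visited := fun hm => by
            rw [(PySem.Set.contains_iff visited u).mpr hm] at hvff; cases hvff
          simp [pvSurv, hxu, Function.comp, hmem]
        · simp [pvSurv, hxu, Function.comp, Bool.and_comm]
      -- F2: A finds a match iff B finds an unvisited successor
      have hF2 : (pairs.filter (pvSurv visited)).any (fun x => decide (some x.1 = some u))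
          = ((pvAdjOf pairs).getD u []).any (fun v => !(visited.contains v)) := by
        cases hA : (pairs.filter (pvSurv visited)).any (fun x => decide (some x.1 = some u)) with
        | true =>
          obtain ⟨x, hxm, hxc⟩ := List.any_eq_true.mp hA
          have : x.2 ∈ ((pvAdjOf pairs).getD u []).filter (fun v => !(visited.contains v)) := by
            rw [← hF1]
            exact List.mem_map.mpr ⟨x, List.mem_filter.mpr ⟨hxm, hxc⟩, rfl⟩
          obtain ⟨h1, h2⟩ := List.mem_filter.mp this
          exact (List.any_eq_true.mpr ⟨x.2, h1, h2⟩).symm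
        | false =>
          have hnil : ((pvAdjOf pairs).getD u []).filter (fun v => !(visited.contains v)) = [] := by
            rw [← hF1]
            rw [List.map_eq_nil_iff]
            exact List.filter_eq_nil_iff.mpr (List.any_eq_false.mp hA)
          refine (List.any_eq_false.mpr ?_).symm
          intro v hvm hvc
          exact List.ne_nil_of_mem (List.mem_filter.mpr ⟨hvm, hvc⟩) hnil
      -- F3: each matched pair recurses to the same sublists
      have hF3 : ∀ p ∈ (pairs.filter (pvSurv visited)).filter
            (fun x => decide (some x.1 = some u)),
          generate_branches (path ++ [p.2])
              ((pairs.filter (pvSurv visited)).filter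
                (fun x => !(p.1 == x.1 || p.1 == x.2)))
            = genB_dfs (pvAdjOf pairs) (path ++ [p.2]) (PySem.Set.add visited u) := by
        intro p hp
        obtain ⟨hpP, hpc⟩ := List.mem_filter.mp hp
        have hpu : p.1 = u := by simpa using hpc
        have hfil : (pairs.filter (pvSurv visited)).filter
              (fun x => !(p.1 == x.1 || p.1 == x.2))
            = pairs.filter (pvSurv (PySem.Set.add visited u)) := by
          rw [List.filter_filter]
          refine List.filter_congr (fun x _ => ?_)
          simp only [pvSurv, pv_contains_add, hpu, Bool.not_or]
          rw [Bool.beq_comm (a := u) (b := x.1), Bool.beq_comm (a := u) (b := x.2)]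
          generalize visited.contains x.1 = a
          generalize visited.contains x.2 = b
          generalize (x.1 == u) = c
          generalize (x.2 == u) = d
          cases a <;> cases b <;> cases c <;> cases d <;> rfl
        have hdead : pvSurv (PySem.Set.add visited u) p = false := by
          simp only [pvSurv, pv_contains_add, hpu]
          simp
        have hsplit : pairs.filter (pvSurv (PySem.Set.add visited u))
            = (pairs.filter (pvSurv visited)).filter (pvSurv (PySem.Set.add visited u)) := by
          rw [List.filter_filter]
          refine List.filter_congr (fun x _ => ?_)
          simp only [pvSurv, pv_contains_add, Bool.not_or]
          generalize visited.contains x.1 = a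
          generalize visited.contains x.2 = b
          generalize (x.1 == u) = c
          generalize (x.2 == u) = d
          cases a <;> cases b <;> cases c <;> cases d <;> rfl
        have hlt : (pairs.filter (pvSurv (PySem.Set.add visited u))).length
            < (pairs.filter (pvSurv visited)).length := by
          rw [hsplit]
          exact List.length_filter_lt_length_iff_exists.mpr ⟨p, hpP, by simp [hdead]⟩
        rw [hfil]
        exact IH (pairs.filter (pvSurv (PySem.Set.add visited u))).length
          (lt_of_lt_of_le hlt hn) _ _ le_rfl
      rw [List.flatMap_congr hF3]
      have : ((pairs.filter (pvSurv visited)).filter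
            (fun x => decide (some x.1 = some u))).flatMap
            (fun p => genB_dfs (pvAdjOf pairs) (path ++ [p.2]) (PySem.Set.add visited u))
          = (((pairs.filter (pvSurv visited)).filter
              (fun x => decide (some x.1 = some u))).map (fun p => p.2)).flatMap
            (fun v => genB_dfs (pvAdjOf pairs) (path ++ [v]) (PySem.Set.add visited u)) := by
        rw [List.flatMap_map]
      rw [this, hF1, hF2]

theorem generate_branches_spec : Claim_equal_generate_branches := by
  intro branch pairs _ _
  unfold Spec_generate_branches generate_branches_alt
  have h0 : pairs.filter (pvSurv PySem.Set.empty) = pairs := by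
    simp [pvSurv, PySem.Set.empty]
  have := pv_main pairs.length pairs PySem.Set.empty branch (by rw [h0])
  rw [h0] at this
  simpa using this
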